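-- pv_equiv track=rewrite | github.com/zgotter/algorithm-python | programmers/level2/038_전화번호목록_04.py | solution
-- ===== SOURCE A (Python) =====
-- def solution(phone_book):
--     answer = True
--     len_lst = sorted(list(set([len(phone) for phone in phone_book])))
--     for i in len_lst:
--         if len(phone_book) != len(set([phone[:i] for phone in phone_book])):
--             answer = False
--             break
--     return answer
-- ===== SOURCE B (Python) =====
-- def solution(phone_book):
--     # Only the minimum length matters: any i-prefix collision (i a present
--     # length) implies an m-prefix collision at m = min length, so one pass
--     # with an incremental seen-set replaces A's loop over all distinct lengths.
--     if not phone_book: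
--         return True
--     m = min(len(phone) for phone in phone_book)
--     seen = set()
--     for phone in phone_book:
--         head = phone[:m]
--         if head in seen:
--             return False
--         seen.add(head)
--     return True
-- ===== Notes on version B (the rewrite author's own statement) =====
-- stated objective: alternative
-- what changed: A loops over every distinct length, rebuilding the full prefix set each time; B proves only the minimum length matters and does a single pass with an incremental seen-set and early exit.
import Mathlib
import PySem

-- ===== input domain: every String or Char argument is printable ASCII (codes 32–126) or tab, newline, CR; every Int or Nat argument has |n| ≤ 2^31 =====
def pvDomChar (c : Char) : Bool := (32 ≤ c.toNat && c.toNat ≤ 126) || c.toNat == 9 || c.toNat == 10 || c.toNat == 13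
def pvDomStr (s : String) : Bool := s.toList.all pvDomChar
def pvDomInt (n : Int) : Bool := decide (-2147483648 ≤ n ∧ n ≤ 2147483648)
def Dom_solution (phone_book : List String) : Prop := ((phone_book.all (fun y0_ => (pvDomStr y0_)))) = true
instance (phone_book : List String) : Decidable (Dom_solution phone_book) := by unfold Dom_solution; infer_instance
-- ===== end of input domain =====

-- B replaces A's loop over every distinct length (each pass rebuilding the whole prefix set)
-- by a single pass at the minimum length with an incremental seen-set and early exit.

-- ===== PORT A =====
-- for i in len_lst: if len(phone_book) != len(set([phone[:i] for phone in phone_book])): answer = False; break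
def solutionLoopA (pb : List String) : List Int → Bool
  | [] => true
  | i :: rest =>
    if ((pb.length : Int)) ≠ (((PySem.Set.ofList (pb.map (fun phone => PySem.Str.slice phone none (some i)))).length : Int))
    then false
    else solutionLoopA pb rest

def solution (phone_book : List String) : Bool :=
  let len_lst := PySem.List.sorted (PySem.Set.ofList (phone_book.map (fun phone => PySem.Str.len phone))) (fun x => x) false
  solutionLoopA phone_book len_lst

-- ===== PORT B =====
-- for phone in phone_book: head = phone[:m]; if head in seen: return False; seen.add(head)
def solutionAltLoop (m : Int) (seen : PySem.Set String) : List String → Bool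
  | [] => true
  | phone :: rest =>
    let head := PySem.Str.slice phone none (some m)
    if PySem.Set.contains seen head then false
    else solutionAltLoop m (PySem.Set.add seen head) rest

def solution_alt (phone_book : List String) : Bool :=
  if phone_book.isEmpty then true
  else
    match PySem.List.min? (phone_book.map (fun phone => PySem.Str.len phone)) (fun x => x) with
    | none => true  -- unreachable: phone_book is nonempty here
    | some m => solutionAltLoop m PySem.Set.empty phone_book

-- ===== PRECONDITION & SPEC =====
def Spec_solution (phone_book : List String) (out : Bool) : Prop := out = solution_alt phone_book
instance (phone_book : List String) (out : Bool) : Decidable (Spec_solution phone_book out) := by unfold Spec_solution; infer_instance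

-- ===== CLAIM (what is proved, stated in full; the proofs are below) =====
def Claim_equal_solution : Prop := ∀ (phone_book : List String), Dom_solution phone_book → Spec_solution phone_book (solution phone_book)

-- ===== LEMMAS AND PROOFS =====

-- the length-i prefix of a phone number, as both ports compute it
def pvPfx (i : Int) (s : String) : String := PySem.Str.slice s none (some i)

theorem pvPfx_toList (i : Int) (hi : 0 ≤ i) (s : String) :
    (pvPfx i s).toList = s.toList.take i.toNat := by
  simp only [pvPfx, PySem.Str.slice, PySem.Chars.slice_eq_listSlice, String.toList_ofList]
  exact PySem.List.slice_to s.toList hi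

-- prefix of a prefix: for m ≤ i the m-prefix factors through the i-prefix
theorem pvPfx_pfx (m i : Int) (hm : 0 ≤ m) (hmi : m ≤ i) (s : String) :
    pvPfx m (pvPfx i s) = pvPfx m s := by
  apply String.toList_injective
  rw [pvPfx_toList m hm, pvPfx_toList m hm, pvPfx_toList i (le_trans hm hmi)]
  rw [List.take_take]
  congr 1
  omega

-- a set has as many elements as the list it came from iff the list has no duplicates
theorem pvOfList_length_eq_iff {α : Type} [BEq α] [LawfulBEq α] (xs : List α) :
    (PySem.Set.ofList xs).length = xs.length ↔ xs.Nodup := by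
  constructor
  · induction xs using List.reverseRecOn with
    | nil => intro _; exact List.nodup_nil
    | append_singleton ys y ih =>
      intro h
      have hsplit : PySem.Set.ofList (ys ++ [y]) = PySem.Set.add (PySem.Set.ofList ys) y := by
        simp [PySem.Set.ofList, List.foldl_append]
      rw [hsplit] at h
      by_cases hc : (PySem.Set.ofList ys).contains y = true
      · exfalso
        rw [PySem.Set.add, if_pos hc] at h
        have hle := PySem.Set.length_ofList_le ys
        simp only [List.length_append, List.length_singleton] at h
        omega
      · rw [PySem.Set.add, if_neg hc] at h
        simp only [List.length_append, List.length_singleton] at h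
        have hnd : ys.Nodup := ih (by omega)
        have hny : y ∉ ys := fun hy =>
          hc ((PySem.Set.contains_iff _ y).mpr ((PySem.Set.mem_ofList ys y).mpr hy))
        refine List.Nodup.append hnd (List.nodup_singleton y) ?_
        intro a ha hb
        rw [List.mem_singleton] at hb
        exact hny (hb ▸ ha)
  · intro h
    rw [PySem.Set.ofList_eq_self_of_nodup xs h]

-- A's loop returns true iff the prefix set is full-sized at every remaining length
theorem pvLoopA_iff (pb : List String) (l : List Int) :
    solutionLoopA pb l = true ↔
      ∀ i ∈ l, (pb.map (pvPfx i)).Nodup := by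
  induction l with
  | nil => simp [solutionLoopA]
  | cons i rest ih =>
    have hfun : (fun phone => PySem.Str.slice phone none (some i)) = pvPfx i := rfl
    simp only [solutionLoopA, List.mem_cons, hfun]
    by_cases h : (pb.map (pvPfx i)).Nodup
    · have hlen : ((pb.length : Int)) = (((PySem.Set.ofList (pb.map (pvPfx i))).length : Int)) := by
        have h2 := (pvOfList_length_eq_iff (pb.map (pvPfx i))).mpr h
        rw [h2, List.length_map]
      rw [if_neg (by simp [hlen])]
      rw [ih]
      constructor
      · intro hr j hj
        rcases hj with rfl | hj
        · exact h
        · exact hr j hj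
      · intro hr j hj
        exact hr j (Or.inr hj)
    · have hlen : ¬ ((pb.length : Int)) = (((PySem.Set.ofList (pb.map (pvPfx i))).length : Int)) := by
        intro hc
        apply h
        apply (pvOfList_length_eq_iff (pb.map (pvPfx i))).mp
        have h3 : (PySem.Set.ofList (pb.map (pvPfx i))).length = pb.length := by exact_mod_cast hc.symm
        rw [h3, List.length_map]
      rw [if_pos (by simpa using hlen)]
      constructor
      · intro hc; cases hc
      · intro hr
        exact absurd (hr i (Or.inl rfl)) h

-- B's loop returns true iff the remaining prefixes are distinct and avoid 'seen'
theorem pvLoopB_iff (m : Int) (l : List String) :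
    ∀ (seen : PySem.Set String),
      solutionAltLoop m seen l = true ↔
        ((l.map (pvPfx m)).Nodup ∧ ∀ p ∈ l, pvPfx m p ∉ seen) := by
  induction l with
  | nil => intro seen; simp [solutionAltLoop]
  | cons phone rest ih =>
    intro seen
    have hfun : PySem.Str.slice phone none (some m) = pvPfx m phone := rfl
    simp only [solutionAltLoop, hfun]
    by_cases hmem : PySem.Set.contains seen (pvPfx m phone) = true
    · rw [if_pos hmem]
      have hin : pvPfx m phone ∈ seen := (PySem.Set.contains_iff seen (pvPfx m phone)).mp hmem
      constructor
      · intro hc; cases hc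
      · rintro ⟨-, hav⟩
        exact absurd hin (hav phone (List.mem_cons_self))
    · rw [if_neg hmem]
      have hnin : pvPfx m phone ∉ seen := fun hc =>
        hmem ((PySem.Set.contains_iff seen (pvPfx m phone)).mpr hc)
      rw [ih]
      constructor
      · rintro ⟨hnd, hav⟩
        refine ⟨?_, ?_⟩
        · simp only [List.map_cons, List.nodup_cons]
          refine ⟨?_, hnd⟩
          intro hc
          rcases List.mem_map.mp hc with ⟨q, hq, hqe⟩
          exact hav q hq (by rw [hqe]; exact (PySem.Set.mem_add seen (pvPfx m phone) _).mpr (Or.inr rfl))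
        · intro p hp
          rcases List.mem_cons.mp hp with rfl | hp
          · exact hnin
          · intro hc
            exact hav p hp ((PySem.Set.mem_add seen (pvPfx m phone) _).mpr (Or.inl hc))
      · rintro ⟨hnd, hav⟩
        simp only [List.map_cons, List.nodup_cons] at hnd
        refine ⟨hnd.2, ?_⟩
        intro p hp hc
        rcases (PySem.Set.mem_add seen (pvPfx m phone) _).mp hc with hc' | hc'
        · exact hav p (List.mem_cons_of_mem _ hp) hc'
        · exact hnd.1 (hc' ▸ List.mem_map_of_mem hp)

-- ===== VERDICT (by name: the statement is the Claim_ definition above) =====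
-- key step: a prefix collision at any present length forces one at the minimum length
theorem pvNodup_of_min (pb : List String) (m i : Int) (hm0 : 0 ≤ m) (hmi : m ≤ i)
    (h : (pb.map (pvPfx m)).Nodup) : (pb.map (pvPfx i)).Nodup := by
  apply List.Nodup.of_map (pvPfx m)
  have heq : (pb.map (pvPfx i)).map (pvPfx m) = pb.map (pvPfx m) := by
    rw [List.map_map]
    exact List.map_congr_left (fun s _ => pvPfx_pfx m i hm0 hmi s)
  rw [heq]
  exact h

theorem solution_spec : Claim_equal_solution := by
  intro pb _
  unfold Spec_solution
  rcases eq_or_ne pb [] with rfl | hne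
  · rfl
  · obtain ⟨m, hm⟩ : ∃ m, PySem.List.min? (pb.map (fun phone => PySem.Str.len phone)) (fun x => x) = some m := by
      cases hmo : PySem.List.min? (pb.map (fun phone => PySem.Str.len phone)) (fun x => x) with
      | none =>
        rw [PySem.List.min?_eq_none_iff] at hmo
        exact absurd (List.map_eq_nil_iff.mp hmo) hne
      | some m => exact ⟨m, rfl⟩
    have hmmem : m ∈ pb.map (fun phone => PySem.Str.len phone) := PySem.List.min?_mem hm
    have hmin : ∀ y ∈ pb.map (fun phone => PySem.Str.len phone), m ≤ y := PySem.List.min?_isMin hm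
    have hm0 : 0 ≤ m := by
      rcases List.mem_map.mp hmmem with ⟨s, -, rfl⟩
      rw [PySem.Str.len_eq]
      exact Int.natCast_nonneg _
    rw [solution, solution_alt, if_neg (by simpa [List.isEmpty_iff] using hne), hm]
    have hA := pvLoopA_iff pb
      (PySem.List.sorted (PySem.Set.ofList (pb.map (fun phone => PySem.Str.len phone))) (fun x => x) false)
    have hB := pvLoopB_iff m pb PySem.Set.empty
    have hmemiff : ∀ i : Int,
        i ∈ PySem.List.sorted (PySem.Set.ofList (pb.map (fun phone => PySem.Str.len phone))) (fun x => x) false ↔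
        i ∈ pb.map (fun phone => PySem.Str.len phone) := by
      intro i
      rw [PySem.List.mem_sorted, PySem.Set.mem_ofList]
    have key : solutionLoopA pb
        (PySem.List.sorted (PySem.Set.ofList (pb.map (fun phone => PySem.Str.len phone))) (fun x => x) false) = true ↔
        solutionAltLoop m PySem.Set.empty pb = true := by
      rw [hA, hB]
      constructor
      · intro h
        refine ⟨h m ((hmemiff m).mpr hmmem), ?_⟩
        intro p _ hc
        simp [PySem.Set.empty] at hc
      · rintro ⟨h, -⟩
        intro i hi
        exact pvNodup_of_min pb m i hm0 (hmin i ((hmemiff i).mp hi)) h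
    cases hx : solutionLoopA pb
        (PySem.List.sorted (PySem.Set.ofList (pb.map (fun phone => PySem.Str.len phone))) (fun x => x) false) <;>
      cases hy : solutionAltLoop m PySem.Set.empty pb <;> simp_all
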